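-- pv_equiv track=rewrite | github.com/Aniket12xfe/Python_Program | com/company/Arr_Difference.py | Arr_Diff
-- ===== SOURCE A (Python) =====
-- def Arr_Diff(arr):
--     # Convert each element to the most minimized possible form
--     minimized_arr = []
--
--     for num in arr:
--         while num % 2 == 0:
--             num //= 2
--         minimized_arr.append(num)
--
--     # After minimizing all elements, calculate the min and max of the array
--     min_element = min(minimized_arr)
--     max_element = max(minimized_arr)
--
--     # Return the difference between the max and min element
--     return max_element - min_element
-- ===== SOURCE B (Python) =====
-- def Arr_Diff(arr):
--     # Closed-form odd part: n & -n is the lowest set bit of n (two's complement),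
--     # so n // (n & -n) strips all factors of 2 without a loop.
--     odds = [n // (n & -n) for n in arr]
--     return max(odds) - min(odds)
-- ===== Notes on version B (the rewrite author's own statement) =====
-- stated objective: alternative
-- what changed: B replaces A's per-element while-loop of repeated halving with the closed-form bit trick n // (n & -n): the two's-complement AND with the negation isolates the lowest set bit, i.e. the full power-of-two factor, so each odd part is one division instead of an inner loop.
import Mathlib
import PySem

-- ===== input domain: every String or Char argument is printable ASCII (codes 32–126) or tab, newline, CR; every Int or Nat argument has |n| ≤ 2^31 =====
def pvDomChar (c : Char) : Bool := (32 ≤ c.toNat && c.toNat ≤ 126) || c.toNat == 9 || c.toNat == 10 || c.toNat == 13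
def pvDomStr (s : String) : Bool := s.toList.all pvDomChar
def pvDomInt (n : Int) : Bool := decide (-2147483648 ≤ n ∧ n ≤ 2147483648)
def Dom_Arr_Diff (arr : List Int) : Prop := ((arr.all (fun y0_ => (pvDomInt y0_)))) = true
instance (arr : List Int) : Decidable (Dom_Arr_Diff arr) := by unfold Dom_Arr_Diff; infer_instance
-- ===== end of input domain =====

-- B computes each odd part by the closed-form bit trick n // (n & -n) instead of A's
-- inner while-loop of repeated halving.

-- ===== PORT A =====
-- A's inner loop 'while num % 2 == 0: num //= 2'. The 'n ≠ 0' guard only makes the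
-- recursion total: on 0 the Python loop diverges, and Pre_ excludes inputs containing 0.
def pvStrip (n : Int) : Int :=
  if h : n ≠ 0 ∧ PySem.Int.mod n 2 = 0 then pvStrip (PySem.Int.floordiv n 2) else n
termination_by n.natAbs
decreasing_by
  obtain ⟨h0, h2⟩ := h
  have hd : (2 : Int) ∣ n := (PySem.Int.mod_eq_zero_iff_dvd n 2).mp h2
  obtain ⟨k, hk⟩ := hd
  have : PySem.Int.floordiv n 2 = k := by
    rw [PySem.Int.floordiv_eq_ediv_of_pos (by norm_num)]
    omega
  rw [this]
  have hk0 : k ≠ 0 := by intro h; simp [h] at hk; exact h0 hk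
  subst hk
  simp only [Int.natAbs_mul]
  have : (2 : Int).natAbs = 2 := rfl
  rw [this]
  have : k.natAbs ≠ 0 := Int.natAbs_ne_zero.mpr hk0
  omega

def Arr_Diff (arr : List Int) : Int :=
  let minimized_arr := arr.foldl (fun acc num => acc ++ [pvStrip num]) []
  match PySem.List.min? minimized_arr (fun x => x), PySem.List.max? minimized_arr (fun x => x) with
  | some lo, some hi => hi - lo
  | _, _ => 0   -- Python's min([]) raises ValueError; excluded by Pre_

-- ===== PORT B =====
def Arr_Diff_alt (arr : List Int) : Int :=
  let odds := arr.map (fun n => PySem.Int.floordiv n (PySem.Int.band n (-n)))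
  match PySem.List.max? odds (fun x => x) with
  | none => 0   -- Python's max([]) raises ValueError; excluded by Pre_
  | some hi =>
    match PySem.List.min? odds (fun x => x) with
    | none => 0
    | some lo => hi - lo

-- ===== PRECONDITION & SPEC =====
-- Pre_ excludes the empty list (both Pythons raise ValueError) and lists containing 0
-- (A's inner while-loop never terminates on 0, B raises ZeroDivisionError).
def Pre_Arr_Diff (arr : List Int) : Prop := arr ≠ [] ∧ (0 : Int) ∉ arr
instance (arr : List Int) : Decidable (Pre_Arr_Diff arr) := by unfold Pre_Arr_Diff; infer_instance
def pvWitness_Arr_Diff : List Int := [12, -6, 5]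

def Spec_Arr_Diff (arr : List Int) (out : Int) : Prop := out = Arr_Diff_alt arr
instance (arr : List Int) (out : Int) : Decidable (Spec_Arr_Diff arr out) := by unfold Spec_Arr_Diff; infer_instance

-- ===== CLAIM =====
def Claim_equal_Arr_Diff : Prop := ∀ (arr : List Int), Dom_Arr_Diff arr → Pre_Arr_Diff arr → Spec_Arr_Diff arr (Arr_Diff arr)

-- ===== LEMMAS AND PROOFS =====

-- lowbit m = the largest power of two dividing m (for m > 0); proof-only helper
def pvLowbit : Nat → Nat
  | 0 => 0
  | m + 1 => if (m + 1) % 2 = 1 then 1 else 2 * pvLowbit ((m + 1) / 2)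
termination_by m => m
decreasing_by omega

theorem pvLowbit_odd (m : Nat) (h : m % 2 = 1) : pvLowbit m = m % 2 := by
  match m, h with
  | m + 1, h => rw [pvLowbit, if_pos h, h]

theorem pvLowbit_even (m : Nat) (h0 : m ≠ 0) (h : m % 2 = 0) :
    pvLowbit m = 2 * pvLowbit (m / 2) := by
  match m, h0 with
  | m + 1, _ => rw [pvLowbit, if_neg (by omega)]

-- (2k+1) &&& (2k) = 2k : the AND with the predecessor of an odd number clears only bit 0
theorem pvAnd_odd (k : Nat) : (2 * k + 1) &&& (2 * k) = 2 * k := by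
  apply Nat.eq_of_testBit_eq
  intro i
  cases i with
  | zero => simp [Nat.testBit_zero, Nat.mul_mod_right]
  | succ i =>
      rw [Nat.testBit_and, Nat.testBit_succ, Nat.testBit_succ]
      rw [show (2 * k + 1) / 2 = k from by omega, show 2 * k / 2 = k from by omega,
        Bool.and_self]

-- (2k) &&& (2k-1) = 2 * (k &&& (k-1)) for k > 0 : halving commutes with the clear-low-bit AND
theorem pvAnd_even (k : Nat) (hk : k ≠ 0) :
    (2 * k) &&& (2 * k - 1) = 2 * (k &&& (k - 1)) := by
  apply Nat.eq_of_testBit_eq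
  intro i
  cases i with
  | zero =>
      simp [Nat.testBit_zero, Nat.mul_mod_right]
  | succ i =>
      rw [Nat.testBit_and, Nat.testBit_succ, Nat.testBit_succ]
      rw [show 2 * k / 2 = k from by omega, show (2 * k - 1) / 2 = k - 1 from by omega,
        Nat.testBit_succ, show 2 * (k &&& (k - 1)) / 2 = k &&& (k - 1) from by omega,
        Nat.testBit_and]

-- m - (m &&& (m-1)) = lowbit m for m > 0
theorem pvSub_and (m : Nat) (h0 : m ≠ 0) : m - (m &&& (m - 1)) = pvLowbit m := by
  induction m using Nat.strong_induction_on with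
  | _ m ih =>
    rcases Nat.even_or_odd m with he | ho
    · obtain ⟨k, hk⟩ := he
      have hk' : m = 2 * k := by omega
      subst hk'
      have hkk : k ≠ 0 := by omega
      rw [pvAnd_even k hkk, pvLowbit_even _ h0 (by omega)]
      have h2 : 2 * k / 2 = k := by omega
      rw [h2, ← ih k (by omega) hkk]
      have := Nat.and_le_left (n := k) (m := k - 1)
      omega
    · obtain ⟨k, hk⟩ := ho
      subst hk
      have h1 : 2 * k + 1 - 1 = 2 * k := by omega
      rw [h1, pvAnd_odd, pvLowbit_odd _ (by omega)]
      omega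

theorem pvLowbit_pos (m : Nat) (h0 : m ≠ 0) : 0 < pvLowbit m := by
  induction m using Nat.strong_induction_on with
  | _ m ih =>
    rcases Nat.even_or_odd m with he | ho
    · obtain ⟨k, hk⟩ := he
      have hk' : m = 2 * k := by omega
      subst hk'
      rw [pvLowbit_even _ h0 (by omega)]
      have h2 : 2 * k / 2 = k := by omega
      rw [h2]
      have := ih k (by omega) (by omega)
      omega
    · obtain ⟨k, hk⟩ := ho
      subst hk
      rw [pvLowbit_odd _ (by omega)]
      omega

-- band n (-n) is the lowest set bit, as a Nat computation on |n|
theorem pvBand_neg (n : Int) (h0 : n ≠ 0) :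
    PySem.Int.band n (-n) = (pvLowbit n.natAbs : Int) := by
  unfold PySem.Int.band
  rcases lt_or_gt_of_ne h0 with hn | hn
  · rw [if_neg (by omega), if_pos (by omega)]
    have h1 : (-n).toNat = n.natAbs := by omega
    have h2 : (-n - 1).toNat = n.natAbs - 1 := by omega
    rw [h1, h2, pvSub_and _ (by omega)]
  · rw [if_pos (by omega), if_neg (by omega)]
    have h1 : n.toNat = n.natAbs := by omega
    have h2 : (-(-n) - 1).toNat = n.natAbs - 1 := by omega
    rw [h1, h2, pvSub_and _ (by omega)]

-- the closed form equals A's stripping loop, for n ≠ 0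
theorem pvClosedForm (n : Int) (h0 : n ≠ 0) :
    PySem.Int.floordiv n (PySem.Int.band n (-n)) = pvStrip n := by
  have main : ∀ k : Nat, ∀ n : Int, n.natAbs ≤ k → n ≠ 0 →
      PySem.Int.floordiv n (PySem.Int.band n (-n)) = pvStrip n := by
    intro k
    induction k with
    | zero => intro n hk h0; omega
    | succ k ih =>
        intro n hk h0
        by_cases hm : PySem.Int.mod n 2 = 0
        · -- even: strip one factor of 2 on both sides
          obtain ⟨m, hd⟩ := (PySem.Int.mod_eq_zero_iff_dvd n 2).mp hm
          have hm0 : m ≠ 0 := by rintro rfl; simp at hd; exact h0 hd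
          have hdv2 : PySem.Int.floordiv n 2 = m := by
            rw [PySem.Int.floordiv_eq_ediv_of_pos (by norm_num)]
            omega
          have hstrip : pvStrip n = pvStrip m := by
            rw [pvStrip, dif_pos ⟨h0, hm⟩, hdv2]
          have hnat : n.natAbs = 2 * m.natAbs := by
            subst hd; simp [Int.natAbs_mul]
          have hLpos : 0 < pvLowbit m.natAbs := pvLowbit_pos _ (Int.natAbs_ne_zero.mpr hm0)
          rw [hstrip, pvBand_neg n h0,
            pvLowbit_even n.natAbs (Int.natAbs_ne_zero.mpr h0) (by omega),
            show n.natAbs / 2 = m.natAbs by omega]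
          rw [PySem.Int.floordiv_eq_ediv_of_pos (by push_cast; omega)]
          have h2 : ((2 * pvLowbit m.natAbs : Nat) : Int) = 2 * (pvLowbit m.natAbs : Int) := by
            push_cast; ring
          rw [h2, hd, Int.mul_ediv_mul_of_pos _ _ (by norm_num)]
          rw [← PySem.Int.floordiv_eq_ediv_of_pos (by omega)]
          rw [← pvBand_neg m hm0]
          exact ih m (by omega) hm0
        · -- odd: both sides are n itself
          have hnd : ¬ (2 : Int) ∣ n := fun h => hm ((PySem.Int.mod_eq_zero_iff_dvd n 2).mpr h)
          have hodd : n.natAbs % 2 = 1 := by omega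
          rw [pvStrip, dif_neg (by tauto), pvBand_neg n h0,
            pvLowbit_odd n.natAbs hodd, hodd]
          rw [PySem.Int.floordiv_eq_ediv_of_pos (by norm_num)]
          simp
  exact main n.natAbs n le_rfl h0

theorem pvFoldAppend (f : Int → Int) (l : List Int) (acc : List Int) :
    l.foldl (fun a n => a ++ [f n]) acc = acc ++ l.map f := by
  induction l generalizing acc with
  | nil => simp
  | cons x t ih => simp [List.foldl, ih]

-- ===== VERDICT =====
theorem Arr_Diff_spec : Claim_equal_Arr_Diff := by
  intro arr _ hpre
  obtain ⟨hne, hz⟩ := hpre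
  have hmap : arr.map (fun n => PySem.Int.floordiv n (PySem.Int.band n (-n))) = arr.map pvStrip := by
    apply List.map_congr_left
    intro x hx
    exact pvClosedForm x (by rintro rfl; exact hz hx)
  match arr, hne with
  | a :: t, _ =>
      unfold Spec_Arr_Diff Arr_Diff Arr_Diff_alt
      rw [pvFoldAppend]
      simp only [List.nil_append]
      rw [hmap]
      simp only [List.map]
      rw [PySem.List.min?_id_cons, PySem.List.max?_id_cons]
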